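-- pv_equiv track=rewrite | github.com/dleemiller/CnakeCharmer | cnake_charmer/py/compression/png_filters.py | _generate_scanlines
-- ===== SOURCE A (Python) =====
-- def _generate_scanlines(width, height, filter_unit):
--     """Generate deterministic scanline data as list of lists of ints (0-255)."""
--     row_bytes = width * filter_unit
--     scanlines = []
--     for y in range(height):
--         row = []
--         for x in range(row_bytes):
--             row.append(((y * 131 + x * 37 + 7) * 73) % 256)
--         scanlines.append(row)
--     return scanlines
-- ===== SOURCE B (Python) =====
-- def _generate_scanlines(width, height, filter_unit):
--     """Generate deterministic scanline data as list of lists of ints (0-255)."""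
--     if height <= 0:
--         return []
--     base_x = []
--     for x in range(width * filter_unit):
--         base_x.append(((x * 37 + 7) * 73) % 256)
--     scanlines = []
--     for y in range(height):
--         row_const = (y * 131 * 73) % 256
--         scanlines.append([(row_const + b) % 256 for b in base_x])
--     return scanlines
-- ===== Notes on version B (the rewrite author's own statement) =====
-- stated objective: alternative
-- what changed: Builds a per-column byte table once in its own pre-pass, then assembles each row by adding a single per-row constant mod 256 to the table, instead of recomputing the full affine expression for every (y,x) pair.
import Mathlib
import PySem

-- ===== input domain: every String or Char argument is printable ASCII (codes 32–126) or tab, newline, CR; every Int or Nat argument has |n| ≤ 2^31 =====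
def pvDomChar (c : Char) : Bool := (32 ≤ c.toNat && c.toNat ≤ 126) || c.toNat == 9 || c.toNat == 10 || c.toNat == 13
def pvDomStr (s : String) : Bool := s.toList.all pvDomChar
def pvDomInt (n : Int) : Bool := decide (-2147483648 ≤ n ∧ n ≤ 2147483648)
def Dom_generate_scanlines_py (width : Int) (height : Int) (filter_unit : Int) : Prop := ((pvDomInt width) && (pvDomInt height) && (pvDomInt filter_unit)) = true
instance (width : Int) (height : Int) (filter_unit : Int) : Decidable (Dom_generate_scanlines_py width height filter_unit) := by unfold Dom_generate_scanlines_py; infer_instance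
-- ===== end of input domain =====

-- B precomputes the per-column byte table in a pre-pass and assembles each row by adding a per-row constant mod 256; exact same output.

-- ===== PORT A =====
def generate_scanlines_py (width : Int) (height : Int) (filter_unit : Int) : List (List Int) :=
  let row_bytes := width * filter_unit
  (PySem.List.pyRange 0 height 1).foldl
    (fun scanlines y =>
      scanlines ++
        [(PySem.List.pyRange 0 row_bytes 1).foldl
           (fun row x => row ++ [PySem.Int.mod ((y * 131 + x * 37 + 7) * 73) 256]) []])
    []

-- ===== PORT B =====
def generate_scanlines_py_alt (width : Int) (height : Int) (filter_unit : Int) : List (List Int) :=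
  if height ≤ 0 then [] else
  let base_x :=
    (PySem.List.pyRange 0 (width * filter_unit) 1).foldl
      (fun acc x => acc ++ [PySem.Int.mod ((x * 37 + 7) * 73) 256]) []
  (PySem.List.pyRange 0 height 1).foldl
    (fun scanlines y =>
      let row_const := PySem.Int.mod (y * 131 * 73) 256
      scanlines ++ [base_x.map (fun b => PySem.Int.mod (row_const + b) 256)])
    []

-- ===== PRECONDITION & SPEC =====
def Spec_generate_scanlines_py (width : Int) (height : Int) (filter_unit : Int) (out : List (List Int)) : Prop := out = generate_scanlines_py_alt width height filter_unit
instance (width : Int) (height : Int) (filter_unit : Int) (out : List (List Int)) : Decidable (Spec_generate_scanlines_py width height filter_unit out) := by unfold Spec_generate_scanlines_py; infer_instance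

-- ===== CLAIM (what is proved, stated in full; the proofs are below) =====
def Claim_equal_generate_scanlines_py : Prop := ∀ (width : Int) (height : Int) (filter_unit : Int), Dom_generate_scanlines_py width height filter_unit → Spec_generate_scanlines_py width height filter_unit (generate_scanlines_py width height filter_unit)

-- ===== LEMMAS AND PROOFS =====

-- pointwise modular identity: the row constant distributes out of the per-cell mod
lemma cell_mod_split (y x : Int) :
    PySem.Int.mod ((y * 131 + x * 37 + 7) * 73) 256 =
      PySem.Int.mod (PySem.Int.mod (y * 131 * 73) 256 + PySem.Int.mod ((x * 37 + 7) * 73) 256) 256 := by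
  simp only [PySem.Int.mod_eq_emod_of_pos (show (0:Int) < 256 by norm_num)]
  rw [← Int.add_emod]
  have h : (y * 131 + x * 37 + 7) * 73 = y * 131 * 73 + (x * 37 + 7) * 73 := by ring
  rw [h]

-- ===== VERDICT (by name: the statement is the Claim_ definition above) =====
theorem generate_scanlines_py_spec : Claim_equal_generate_scanlines_py := by
  intro width height filter_unit _
  show _ = _
  unfold generate_scanlines_py generate_scanlines_py_alt
  by_cases hh : height ≤ 0
  · simp [hh, PySem.List.pyRange_one_eq_nil hh]
  simp only [if_neg hh]
  simp only [PySem.List.foldl_append_singleton_eq_map, List.nil_append, List.map_map]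
  refine List.map_congr_left fun y _ => ?_
  refine List.map_congr_left fun x _ => ?_
  exact cell_mod_split y x
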